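-- pv_equiv track=rewrite | github.com/Shit-I-do-in-school/school_programming | Prov/prov1.py | convert
-- ===== SOURCE A (Python) =====
-- konsonanter = ["b","c","d","f","g","h","j","k","l","m","n","p","q","r","s","t","v","z","x"]#konsonanterna
--
-- def convert(text):#funktion till att översätta
--     #fixa variabler
--     letters = []
--     pos = 0
--     final = ""
--
--     for letter in text: letters.append(letter)#konvertar inputen till list med varje bokstav och symbol som egen objekt
--
--     for item in letters:#for varje objekt i listan
--         if item in konsonanter:#om bokstaven är konsonant
--             new_item = item + "o" + item#lägger till o och samma bokstav
--             #byt ut bokstaven med nya bokstäver som är översättade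
--             letters.pop(pos)
--             letters.insert(pos, new_item)
--         pos += 1#den räknar position i listan letters
--
--     for i in letters: final += i#omvandla listan letters till en string kallade final
--     return final#returna stringet
-- ===== SOURCE B (Python) =====
-- konsonanter = ["b","c","d","f","g","h","j","k","l","m","n","p","q","r","s","t","v","z","x"]
--
-- table = {ord(c): c + "o" + c for c in konsonanter}
--
-- def convert(text):
--     return text.translate(table)
-- ===== Notes on version B (the rewrite author's own statement) =====
-- stated objective: idiomatic
-- what changed: Replaces A's list-building, in-place pop/insert scan and string-accumulation loop with a precomputed translation table applied via str.translate in one pass.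
import Mathlib
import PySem

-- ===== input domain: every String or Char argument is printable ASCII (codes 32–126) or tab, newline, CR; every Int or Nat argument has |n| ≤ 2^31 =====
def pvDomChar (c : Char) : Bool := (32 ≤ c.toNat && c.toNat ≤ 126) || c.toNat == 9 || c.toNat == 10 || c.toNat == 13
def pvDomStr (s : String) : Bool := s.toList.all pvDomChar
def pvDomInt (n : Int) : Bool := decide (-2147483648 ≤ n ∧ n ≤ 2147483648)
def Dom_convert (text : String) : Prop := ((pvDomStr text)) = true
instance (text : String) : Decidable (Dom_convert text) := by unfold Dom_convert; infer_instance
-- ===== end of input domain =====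

-- B replaces A's list-scan with in-place pop/insert edits by a precomputed translation table applied in one pass (idiomatic).

-- ===== PORT A =====
def konsonanterA : List (List Char) :=
  [['b'],['c'],['d'],['f'],['g'],['h'],['j'],['k'],['l'],['m'],['n'],['p'],['q'],['r'],['s'],['t'],['v'],['z'],['x']]

-- the second for-loop of A: iterate over the (mutating) list by index, pos counts positions;
-- pop/insert are PySem.List.pop?/insert; pop here is always in range, so the getD fallback is never taken.
def convertLoopA : List (List Char) → Int → Nat → Nat → List (List Char)
  | letters, _, _, 0 => letters
  | letters, pos, idx, fuel+1 =>
    match letters[idx]? with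
    | none => letters
    | some item =>
      let letters' :=
        if item ∈ konsonanterA then
          PySem.List.insert (((PySem.List.pop? letters pos).map (·.2)).getD letters) pos (item ++ ['o'] ++ item)
        else letters
      convertLoopA letters' (pos + 1) (idx + 1) fuel

def convert (text : String) : String :=
  let letters := text.toList.map (fun c => [c])
  let letters2 := convertLoopA letters 0 0 letters.length
  String.ofList (letters2.foldl (· ++ ·) [])

-- ===== PORT B =====
-- table = {c: c+"o"+c for c in konsonanter}  (keys are the chars; Python keys on ord(c))
def tableB : PySem.Dict Char (List Char) :=
  (['b','c','d','f','g','h','j','k','l','m','n','p','q','r','s','t','v','z','x']).foldl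
    (fun d c => d.insert c [c, 'o', c]) PySem.Dict.empty

-- text.translate(table): each char is replaced by its table entry, or kept
def convert_alt (text : String) : String :=
  String.ofList ((text.toList.map (fun c => tableB.getD c [c])).flatten)

-- ===== PRECONDITION & SPEC =====
def Spec_convert (text : String) (out : String) : Prop := out = convert_alt text
instance (text : String) (out : String) : Decidable (Spec_convert text out) := by unfold Spec_convert; infer_instance

-- ===== CLAIM (what is proved, stated in full; the proofs are below) =====
def Claim_equal_convert : Prop := ∀ (text : String), Dom_convert text → Spec_convert text (convert text)

-- ===== LEMMAS AND PROOFS =====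

def gA (item : List Char) : List Char :=
  if item ∈ konsonanterA then item ++ ['o'] ++ item else item

lemma getD_foldl_kons (ks : List Char) (d : PySem.Dict Char (List Char)) (c : Char) :
    (ks.foldl (fun d k => d.insert k [k, 'o', k]) d).getD c [c]
      = if c ∈ ks then [c, 'o', c] else d.getD c [c] := by
  induction ks generalizing d with
  | nil => simp
  | cons k ks ih =>
    simp only [List.foldl_cons, ih, PySem.Dict.getD_insert, List.mem_cons]
    by_cases h1 : c ∈ ks
    · simp [h1]
    · by_cases h2 : c = k
      · subst h2; simp [h1]
      · simp [h1, h2]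

lemma getD_tableB (c : Char) : tableB.getD c [c] = gA [c] := by
  rw [tableB, getD_foldl_kons, gA]
  simp only [PySem.Dict.getD_empty]
  split_ifs with h1 h2 <;> simp_all [konsonanterA]

lemma loopA_inv (rest done : List (List Char)) :
    convertLoopA (done ++ rest) (done.length : Int) done.length rest.length
      = done ++ rest.map gA := by
  induction rest generalizing done with
  | nil => simp [convertLoopA]
  | cons r rs ih =>
    simp only [List.length_cons]
    rw [convertLoopA]
    have hget : (done ++ r :: rs)[done.length]? = some r := by
      simp
    rw [hget]
    simp only []
    have hlen : done.length < (done ++ r :: rs).length := by simp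
    have hpop : PySem.List.pop? (done ++ r :: rs) (done.length : Int)
        = some ((done ++ r :: rs)[done.length], (done ++ r :: rs).eraseIdx done.length) :=
      PySem.List.pop?_natCast _ _ hlen
    have herase : (done ++ r :: rs).eraseIdx done.length = done ++ rs := by
      rw [List.eraseIdx_append_of_length_le (by omega)]
      simp
    by_cases hk : r ∈ konsonanterA
    · rw [if_pos hk, hpop]
      simp only [Option.map_some, Option.getD_some, herase]
      have hins : PySem.List.insert (done ++ rs) (done.length : Int) (r ++ ['o'] ++ r)
          = done ++ (r ++ ['o'] ++ r) :: rs := by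
        rw [PySem.List.insert_natCast _ _ _ (by simp)]
        simp
      rw [hins]
      have : (done.length : Int) + 1 = ((done ++ [r ++ ['o'] ++ r]).length : Int) := by simp
      rw [this]
      have h2 : done.length + 1 = (done ++ [r ++ ['o'] ++ r]).length := by simp
      calc convertLoopA (done ++ (r ++ ['o'] ++ r) :: rs)
              ((done ++ [r ++ ['o'] ++ r]).length : Int) (done.length + 1) rs.length
          = convertLoopA ((done ++ [r ++ ['o'] ++ r]) ++ rs)
              ((done ++ [r ++ ['o'] ++ r]).length : Int) (done ++ [r ++ ['o'] ++ r]).length rs.length := by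
            rw [h2]; simp
        _ = (done ++ [r ++ ['o'] ++ r]) ++ rs.map gA := ih _
        _ = done ++ (r :: rs).map gA := by simp [gA, hk]
    · rw [if_neg hk]
      have : (done.length : Int) + 1 = ((done ++ [r]).length : Int) := by simp
      rw [this]
      have h2 : done.length + 1 = (done ++ [r]).length := by simp
      calc convertLoopA (done ++ r :: rs) ((done ++ [r]).length : Int) (done.length + 1) rs.length
          = convertLoopA ((done ++ [r]) ++ rs) ((done ++ [r]).length : Int) (done ++ [r]).length rs.length := by
            rw [h2]; simp
        _ = (done ++ [r]) ++ rs.map gA := ih _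
        _ = done ++ (r :: rs).map gA := by simp [gA, hk]

-- ===== VERDICT (by name: the statement is the Claim_ definition above) =====
theorem convert_spec : Claim_equal_convert := by
  intro text _
  unfold Spec_convert convert_alt
  have h := loopA_inv (text.toList.map (fun c => [c])) []
  simp only [List.nil_append, List.length_nil, Nat.cast_zero] at h
  show String.ofList ((convertLoopA (text.toList.map (fun c => [c])) 0 0
      (text.toList.map (fun c => [c])).length).foldl (· ++ ·) []) = _
  rw [h]
  have hf := PySem.List.foldl_append_eq_flatMap (id : List Char → List Char)
    (l := (text.toList.map (fun c => [c])).map gA) (acc := [])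
  simp only [id] at hf
  rw [hf]
  simp only [List.nil_append, List.map_map, List.flatMap_id,
    Function.comp_def, getD_tableB]
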